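-- pv_equiv track=rewrite | github.com/miseop25/Back_Jun_Code_Study | Programmers/기타문제/자물쇠와_열쇠/lockAndKey_ver2.py | makeCompArray
-- ===== SOURCE A (Python) =====
-- def makeCompArray(lock) :
--     N = len(lock)
--     T = N*3
--     result = [[0 for _ in range(T)] for _ in range(T)]
--     for i in range(N,N+N) :
--         for j in range(N,N+N) :
--             result[i][j] = lock[i-(N)][j-(N)]
--     return result
-- ===== SOURCE B (Python) =====
-- def makeCompArray(lock):
--     # Grow the NxN lock into the 3Nx3N grid by wrapping it in a one-cell zero
--     # border, N times; no grid is preallocated and no cell is index-assigned.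
--     N = len(lock)
--     grid = [[row[j] for j in range(N)] for row in lock]
--     for _ in range(N):
--         width = len(grid[0]) + 2
--         grid = [[0] * width] + [[0] + row + [0] for row in grid] + [[0] * width]
--     return grid
-- ===== Notes on version B (the rewrite author's own statement) =====
-- stated objective: alternative
-- what changed: B never preallocates or index-assigns a grid: it takes the NxN lock and wraps it in a one-cell zero border N times (each pass prepends/appends a zero row and pads every row with one zero on each side), growing the matrix ring by ring to 3Nx3N; this trades A's O(N^2) fill for an O(N^3) incremental construction.
import Mathlib
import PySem

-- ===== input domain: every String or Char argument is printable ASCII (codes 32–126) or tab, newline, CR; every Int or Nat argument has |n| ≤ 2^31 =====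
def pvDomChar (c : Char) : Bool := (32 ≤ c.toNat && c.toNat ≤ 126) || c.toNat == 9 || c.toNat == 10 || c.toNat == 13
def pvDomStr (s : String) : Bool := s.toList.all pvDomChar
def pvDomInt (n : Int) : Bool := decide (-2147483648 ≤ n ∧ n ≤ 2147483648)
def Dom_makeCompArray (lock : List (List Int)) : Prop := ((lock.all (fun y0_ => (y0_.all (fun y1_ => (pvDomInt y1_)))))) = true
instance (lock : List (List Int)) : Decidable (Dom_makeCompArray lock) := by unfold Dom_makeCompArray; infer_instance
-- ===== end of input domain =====

-- B grows the lock into the 3N×3N grid by wrapping a one-cell zero border around it N times,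
-- instead of A's preallocated zero grid with cell-by-cell index copying (objective: alternative).

-- ===== PORT A =====
-- `result[i][j] = v` for nonnegative in-range i (as here); out-of-range rows leave the grid unchanged
-- (that case is excluded by Pre_makeCompArray, under which the Python assignment never raises).
def pvSet2 (res : List (List Int)) (i j : Nat) (v : Int) : List (List Int) :=
  match res[i]? with
  | some row => res.set i (row.set j v)
  | none => res

def makeCompArray (lock : List (List Int)) : List (List Int) :=
  let N : Int := lock.length
  let T : Int := N * 3
  let result := (PySem.List.pyRange 0 T 1).map (fun _ => (PySem.List.pyRange 0 T 1).map (fun _ => (0 : Int)))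
  (PySem.List.pyRange N (N + N) 1).foldl (fun res i =>
    (PySem.List.pyRange N (N + N) 1).foldl (fun res j =>
      -- lock[i-N][j-N]: pyGetD with defaults is exact here since Pre_ keeps both indices in range
      pvSet2 res i.toNat j.toNat
        (PySem.List.pyGetD (PySem.List.pyGetD lock (i - N) []) (j - N) 0)) res) result

-- ===== PORT B =====
-- the loop body of Source B: wrap the current grid in a one-cell zero border.
-- len(grid[0]) is ported as (g.headD []).length: exact, since the loop body only runs
-- when N ≥ 1, and then grid is nonempty in every iteration.
def ringB (g : List (List Int)) : List (List Int) :=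
  let width := (g.headD []).length + 2
  [List.replicate width (0 : Int)] ++ g.map (fun row => [0] ++ row ++ [0]) ++ [List.replicate width (0 : Int)]

def makeCompArray_alt (lock : List (List Int)) : List (List Int) :=
  let N := lock.length
  -- row[j]: pyGetD is exact here since Pre_ keeps j < N ≤ row.length
  let grid := lock.map (fun row => (List.range N).map (fun (j : Nat) => PySem.List.pyGetD row (j : Int) 0))
  (List.range N).foldl (fun g _ => ringB g) grid

-- ===== PRECONDITION & SPEC =====
-- Pre_ excludes exactly the inputs where A raises IndexError: a lock row shorter than len(lock).
def Pre_makeCompArray (lock : List (List Int)) : Prop :=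
  ∀ row ∈ lock, lock.length ≤ row.length
instance (lock : List (List Int)) : Decidable (Pre_makeCompArray lock) := by
  unfold Pre_makeCompArray; infer_instance

def pvWitness_makeCompArray : List (List Int) := [[1, 2], [3, 4]]

def Spec_makeCompArray (lock : List (List Int)) (out : List (List Int)) : Prop := out = makeCompArray_alt lock
instance (lock : List (List Int)) (out : List (List Int)) : Decidable (Spec_makeCompArray lock out) := by unfold Spec_makeCompArray; infer_instance

-- ===== CLAIM (what is proved, stated in full; the proofs are below) =====
def Claim_equal_makeCompArray : Prop := ∀ (lock : List (List Int)), Dom_makeCompArray lock → Pre_makeCompArray lock → Spec_makeCompArray lock (makeCompArray lock)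

-- ===== LEMMAS AND PROOFS =====

-- folding a grid-level pvSet2 at a fixed row index is setting that row to a row-level fold
theorem foldl_pvSet2 (js : List Nat) (i : Nat) (σ : Nat → Nat) (g : Nat → Int)
    (res : List (List Int)) (hi : i < res.length) :
    js.foldl (fun r j => pvSet2 r i (σ j) (g j)) res
      = res.set i (js.foldl (fun row j => row.set (σ j) (g j)) (res.getD i [])) := by
  induction js generalizing res with
  | nil => simp only [List.foldl_nil, List.getD_eq_getElem _ _ hi, List.set_getElem_self]
  | cons j js ih =>
    simp only [List.foldl_cons]
    have h1 : pvSet2 res i (σ j) (g j) = res.set i ((res.getD i []).set (σ j) (g j)) := by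
      simp [pvSet2, List.getElem?_eq_getElem hi]
    rw [h1, ih _ (by simpa using hi)]
    simp [hi, List.getElem_set_self, List.set_set]

-- setting a run of positions a, a+1, …, a+m-1 to g 0, …, g (m-1)
theorem foldl_set_run (m a : Nat) (g : Nat → Int) (r : List Int) (h : a + m ≤ r.length) :
    (List.range m).foldl (fun row k => row.set (a + k) (g k)) r
      = r.take a ++ (List.range m).map g ++ r.drop (a + m) := by
  induction m with
  | zero => simp [List.take_append_drop]
  | succ m ih =>
    have hlt : a + m < r.length := by omega
    have htk : (r.take a).length = a := by simp; omega
    have hmap : ((List.range m).map g).length = m := by simp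
    rw [List.range_succ, List.map_append, List.foldl_append, ih (by omega)]
    simp only [List.foldl_cons, List.foldl_nil]
    have hl2 : (r.take a ++ (List.range m).map g).length = a + m := by
      simp [htk, hmap]
    rw [List.set_append_right _ _ hl2.le, hl2, Nat.sub_self]
    rw [List.drop_eq_getElem_cons hlt]
    have : a + (m + 1) = a + m + 1 := by omega
    simp only [this, List.append_assoc, List.set_cons_zero, List.map_cons, List.map_nil,
      List.singleton_append]

theorem map_getD_range (n : Nat) (xs : List Int) (h : n ≤ xs.length) :
    (List.range n).map (fun k => xs.getD k 0) = xs.take n := by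
  apply List.ext_getElem
  · simp; omega
  · intro k h1 h2
    simp at h1 h2 ⊢
    simp [List.getElem?_eq_getElem (show k < xs.length by omega)]

-- the centre row built from a lock row
def midRow (N : Nat) (lr : List Int) : List Int :=
  List.replicate N 0 ++ lr.take N ++ List.replicate N 0

theorem outer_main (lock : List (List Int)) (hpre : Pre_makeCompArray lock)
    (m : Nat) (hm : m ≤ lock.length) :
    (List.range m).foldl (fun res k =>
        (List.range lock.length).foldl (fun r k' =>
          pvSet2 r (lock.length + k) (lock.length + k')
            ((lock.getD k []).getD k' 0)) res)
      (List.replicate (3 * lock.length) (List.replicate (3 * lock.length) (0 : Int)))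
      = List.replicate lock.length (List.replicate (3 * lock.length) (0 : Int))
        ++ (lock.take m).map (midRow lock.length)
        ++ List.replicate (2 * lock.length - m) (List.replicate (3 * lock.length) (0 : Int)) := by
  set N := lock.length with hN
  set zrow : List Int := List.replicate (3 * lock.length) (0 : Int) with hzrow
  induction m with
  | zero => simp [hzrow]; omega
  | succ m ih =>
    have hm' : m ≤ N := by omega
    rw [List.range_succ, List.foldl_append, ih hm']
    simp only [List.foldl_cons, List.foldl_nil]
    set prev := List.replicate N zrow ++ (lock.take m).map (midRow N) ++ List.replicate (2 * N - m) zrow with hprev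
    have hlen1 : (List.replicate N zrow ++ (lock.take m).map (midRow N)).length = N + m := by
      simp [List.length_take]; omega
    have hlenp : prev.length = 3 * N := by
      simp [hprev, List.length_take]; omega
    have hidx : N + m < prev.length := by omega
    rw [foldl_pvSet2 _ _ _ _ _ hidx]
    -- the row being modified is still all zeros
    have hrow : prev.getD (N + m) [] = zrow := by
      rw [hprev, List.append_assoc, List.getD_append_right _ _ _ _ (by simp)]
      rw [List.getD_append_right _ _ _ _ (by simp [List.length_take])]
      rw [List.getD_eq_getElem _ _ (by simp [List.length_take]; omega)]
      simp
    rw [hrow]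
    -- fill the run N..2N-1 of the zero row with lock[m][0..N-1]
    have hlock : N ≤ (lock.getD m []).length := by
      have hmem : lock.getD m [] ∈ lock := by
        rw [List.getD_eq_getElem _ _ (by omega)]
        exact List.getElem_mem _
      exact hpre _ hmem
    rw [foldl_set_run N N _ zrow (by simp [hzrow]; omega)]
    rw [map_getD_range N _ hlock]
    have hmid : (List.replicate (3*N) (0:Int)).take N ++ (lock.getD m []).take N
        ++ (List.replicate (3*N) (0:Int)).drop (N + N) = midRow N (lock.getD m []) := by
      have e1 : min N (3*N) = N := by omega
      have e2 : 3*N - (N+N) = N := by omega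
      rw [List.take_replicate, List.drop_replicate, e1, e2, midRow]
    rw [← hzrow] at hmid
    rw [hmid]
    -- place the new row: it lands at position 0 of the trailing zero block
    rw [hprev, List.set_append_right _ _ hlen1.le, hlen1, Nat.sub_self]
    have h2N : 2 * N - m = (2 * N - (m+1)) + 1 := by omega
    rw [h2N, List.replicate_succ, List.set_cons_zero]
    have htk : lock.take (m+1) = lock.take m ++ [lock.getD m []] := by
      rw [List.take_add_one, List.getD_eq_getElem _ _ (by omega),
        List.getElem?_eq_getElem (by omega)]
      simp
    rw [htk, List.map_append]
    simp [List.append_assoc]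

-- A's result in closed form
theorem A_closed (lock : List (List Int)) (hpre : Pre_makeCompArray lock) :
    makeCompArray lock
      = List.replicate lock.length (List.replicate (3 * lock.length) (0 : Int))
        ++ lock.map (midRow lock.length)
        ++ List.replicate lock.length (List.replicate (3 * lock.length) (0 : Int)) := by
  unfold makeCompArray
  simp only []
  have hTnat : (((lock.length : Int)) * 3 - 0).toNat = 3 * lock.length := by omega
  have hz : (PySem.List.pyRange 0 ((lock.length : Int) * 3) 1).map (fun _ => (0 : Int))
      = List.replicate (3 * lock.length) (0 : Int) := by
    rw [List.map_const', PySem.List.length_pyRange_one, hTnat]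
  have hg : (PySem.List.pyRange 0 ((lock.length : Int) * 3) 1).map
        (fun _ => (PySem.List.pyRange 0 ((lock.length : Int) * 3) 1).map (fun _ => (0 : Int)))
      = List.replicate (3 * lock.length) (List.replicate (3 * lock.length) (0 : Int)) := by
    rw [hz, List.map_const', PySem.List.length_pyRange_one, hTnat]
  have hrange : PySem.List.pyRange (lock.length : Int) ((lock.length : Int) + (lock.length : Int)) 1
      = (List.range lock.length).map (fun (k : Nat) => ((lock.length : Int) + (k : Int))) := by
    have e3 : (((lock.length : Int)) + lock.length - lock.length).toNat = lock.length := by omega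
    rw [PySem.List.pyRange_one, e3]
  rw [hg, hrange, List.foldl_map]
  have hbody : (fun (res : List (List Int)) (k : Nat) =>
      ((List.range lock.length).map (fun (k' : Nat) => ((lock.length : Int) + (k' : Int)))).foldl
        (fun r j => pvSet2 r ((lock.length : Int) + (k : Int)).toNat j.toNat
          (PySem.List.pyGetD
            (PySem.List.pyGetD lock (((lock.length : Int) + (k : Int)) - (lock.length : Int)) [])
            (j - (lock.length : Int)) 0)) res)
      = (fun res k =>
      (List.range lock.length).foldl (fun r k' =>
        pvSet2 r (lock.length + k) (lock.length + k') ((lock.getD k []).getD k' 0)) res) := by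
    funext res k
    rw [List.foldl_map]
    have hfun : (fun (r : List (List Int)) (k' : Nat) =>
        pvSet2 r ((lock.length : Int) + (k : Int)).toNat ((lock.length : Int) + (k' : Int)).toNat
          (PySem.List.pyGetD
            (PySem.List.pyGetD lock (((lock.length : Int) + (k : Int)) - (lock.length : Int)) [])
            (((lock.length : Int) + (k' : Int)) - (lock.length : Int)) 0))
        = (fun r k' => pvSet2 r (lock.length + k) (lock.length + k') ((lock.getD k []).getD k' 0)) := by
      funext r k'
      have h1 : ((lock.length : Int) + (k : Int)).toNat = lock.length + k := by omega
      have h2 : ((lock.length : Int) + (k' : Int)).toNat = lock.length + k' := by omega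
      have h3 : ((lock.length : Int) + (k : Int)) - (lock.length : Int) = (k : Int) := by ring
      have h4 : ((lock.length : Int) + (k' : Int)) - (lock.length : Int) = (k' : Int) := by ring
      rw [h1, h2, h3, h4, PySem.List.pyGetD_natCast, PySem.List.pyGetD_natCast]
    rw [hfun]
  rw [hbody, outer_main lock hpre lock.length (le_refl _)]
  have h2N : 2 * lock.length - lock.length = lock.length := by omega
  rw [List.take_length, h2N]

theorem rep_snoc {α : Type} (n : Nat) (a : α) : List.replicate n a ++ [a] = a :: List.replicate n a := by
  rw [← List.replicate_succ', List.replicate_succ]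

-- the state of B's loop after k iterations of the ring step
theorem ring_iter (rows : List (List Int)) (N : Nat) (hne : rows ≠ [])
    (hlen : ∀ r ∈ rows, r.length = N) (k : Nat) :
    (List.range k).foldl (fun g _ => ringB g) rows
      = List.replicate k (List.replicate (N + 2 * k) (0 : Int))
        ++ rows.map (fun r => List.replicate k (0 : Int) ++ r ++ List.replicate k (0 : Int))
        ++ List.replicate k (List.replicate (N + 2 * k) (0 : Int)) := by
  induction k with
  | zero => simp
  | succ k ih =>
    rw [List.range_succ, List.foldl_append, ih]
    simp only [List.foldl_cons, List.foldl_nil]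
    unfold ringB
    simp only []
    -- the head of the k-state has length N + 2k
    have hhead : ((List.replicate k (List.replicate (N + 2 * k) (0 : Int))
        ++ rows.map (fun r => List.replicate k (0 : Int) ++ r ++ List.replicate k (0 : Int))
        ++ List.replicate k (List.replicate (N + 2 * k) (0 : Int))).headD []).length
        = N + 2 * k := by
      cases k with
      | zero =>
        cases rows with
        | nil => exact absurd rfl hne
        | cons r rs =>
          simp [hlen r (List.mem_cons_self)]
      | succ k => simp [List.replicate_succ]
    rw [hhead]
    have e1 : N + 2 * k + 2 = N + 2 * (k + 1) := by omega
    rw [e1]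
    simp only [List.map_append, List.map_map, List.map_replicate]
    have e2 : N + 2 * (k + 1) = (N + 2 * k) + 1 + 1 := by omega
    have hz3 : [(0:Int)] ++ List.replicate (N + 2 * k) (0:Int) ++ [(0:Int)]
        = List.replicate (N + 2 * (k+1)) (0 : Int) := by
      simp [e2, List.replicate_succ, rep_snoc]
    have hmid : ((fun row => [(0:Int)] ++ row ++ [(0:Int)])
          ∘ fun r => List.replicate k (0:Int) ++ r ++ List.replicate k (0:Int))
        = fun r => List.replicate (k+1) (0:Int) ++ r ++ List.replicate (k+1) (0:Int) := by
      funext r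
      simp [Function.comp, List.replicate_succ, rep_snoc, List.append_assoc]
    rw [hz3, hmid]
    simp [List.replicate_succ, rep_snoc, List.append_assoc]

-- B's result in the same closed form
theorem B_closed (lock : List (List Int)) (hpre : Pre_makeCompArray lock) :
    makeCompArray_alt lock
      = List.replicate lock.length (List.replicate (3 * lock.length) (0 : Int))
        ++ lock.map (midRow lock.length)
        ++ List.replicate lock.length (List.replicate (3 * lock.length) (0 : Int)) := by
  unfold makeCompArray_alt
  simp only []
  cases hl : lock with
  | nil => simp
  | cons r0 rs =>
    rw [← hl]
    have hne : lock.map (fun row => (List.range lock.length).map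
        (fun (j : Nat) => PySem.List.pyGetD row (j : Int) 0)) ≠ [] := by
      simp [hl]
    have hlen : ∀ r ∈ lock.map (fun row => (List.range lock.length).map
        (fun (j : Nat) => PySem.List.pyGetD row (j : Int) 0)), r.length = lock.length := by
      intro r hr
      obtain ⟨row, hrow, rfl⟩ := List.mem_map.mp hr
      simp
    rw [ring_iter _ lock.length hne hlen lock.length]
    have e : lock.length + 2 * lock.length = 3 * lock.length := by omega
    rw [e, List.map_map]
    congr 1
    congr 1
    apply List.map_congr_left
    intro row hrow
    simp only [Function.comp]
    have hfun : (fun (j : Nat) => PySem.List.pyGetD row (j : Int) 0)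
        = fun (j : Nat) => row.getD j 0 := by
      funext j; exact PySem.List.pyGetD_natCast ..
    rw [hfun, map_getD_range _ _ (hpre row hrow), midRow]

-- ===== VERDICT (by name: the statement is the Claim_ definition above) =====
theorem makeCompArray_spec : Claim_equal_makeCompArray := by
  intro lock _hdom hpre
  unfold Spec_makeCompArray
  rw [A_closed lock hpre, B_closed lock hpre]
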